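-- pv_equiv track=rewrite | github.com/Gonky05/Projeto-I-Python- | categoria3.py | cifra_data_recursiva
-- ===== SOURCE A (Python) =====
-- tabela = {
--     "A": "11", "B": "12", "C": "13", "D": "14", "E": "15",
--     "F": "16", "G": "17", "H": "18", "I": "19", "J": "10",
--     "K": "91", "L": "92", "M": "93", "N": "94", "O": "95",
--     "P": "96", "Q": "97", "R": "98", "S": "99", "T": "90",
--     "U": "81", "V": "82", "W": "83", "X": "84", "Y": "85",
--     "Z": "86", "0": "87", "1": "88", "2": "89", "3": "80",
--     "4": "41", "5": "42", "6": "43", "7": "44", "8": "45",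
--     "9": "46"
-- }
--
-- def cifra_data_recursiva(palavra):
--     # Nesta condição analisamos se a palavra existe. Se a palavra for nula, ou seja não houver caracteres, retorna string vazia
--     if len(palavra) == 0:
--         return ""
--     # Se a palavra tiver apenas uma letra, retorne a codificação dessa letra apenas
--     elif len(palavra) == 1:
--         return tabela.get(palavra.upper(), "!")
--     # Caso contrário, codifique a primeira letra e chame a função recursivamente para o restante da palavra
--     else:
--         primeira_letra = palavra[0]
--         resto_da_palavra = palavra[1:]
--         # Codifique a primeira letra e adicione à codificação do restante da palavra
--         codigo_letra = tabela.get(primeira_letra.upper(), "!")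
--         return codigo_letra + cifra_data_recursiva(resto_da_palavra)
-- ===== SOURCE B (Python) =====
-- _ALFA = "ABCDEFGHIJKLMNOPQRSTUVWXYZ0123456789"
--
-- def _code(c):
--     # closed-form encoding: index i in _ALFA; tens digit cycles "1","9","8","4"
--     # per block of ten, units digit is (i % 10 + 1) % 10
--     i = _ALFA.find(c.upper())
--     if i < 0:
--         return "!"
--     return "1984"[i // 10] + str((i % 10 + 1) % 10)
--
-- def cifra_data_recursiva(palavra):
--     return "".join(_code(c) for c in palavra)
-- ===== Notes on version B (the rewrite author's own statement) =====
-- stated objective: alternative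
-- what changed: Replaced the dict-lookup head/tail recursion by a per-character closed-form arithmetic encoding (index of the upper-cased char in the letters-then-digits alphabet, tens digit from a 4-char cycle, units digit (i%10+1)%10) mapped over the string and joined once.
import Mathlib
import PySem

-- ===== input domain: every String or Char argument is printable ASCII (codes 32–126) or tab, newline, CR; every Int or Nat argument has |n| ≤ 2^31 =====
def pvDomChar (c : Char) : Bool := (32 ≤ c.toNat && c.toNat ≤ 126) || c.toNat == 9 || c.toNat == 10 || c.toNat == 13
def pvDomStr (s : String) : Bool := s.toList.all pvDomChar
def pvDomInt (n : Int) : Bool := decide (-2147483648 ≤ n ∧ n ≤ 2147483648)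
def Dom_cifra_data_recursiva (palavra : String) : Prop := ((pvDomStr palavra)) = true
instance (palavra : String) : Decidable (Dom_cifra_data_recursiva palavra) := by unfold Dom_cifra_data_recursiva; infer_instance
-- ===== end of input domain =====

set_option maxRecDepth 10000


-- ===== PORT A =====
-- B replaces A's dict-lookup recursion by a per-char closed-form arithmetic encoding
-- (index in "A..Z0..9", tens digit from "1984", units (i%10+1)%10), joined (objective: alternative).

-- the module-level lookup table `tabela`
def tabela : PySem.Dict String String := PySem.Dict.ofList [
  ("A", "11"), ("B", "12"), ("C", "13"), ("D", "14"), ("E", "15"),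
  ("F", "16"), ("G", "17"), ("H", "18"), ("I", "19"), ("J", "10"),
  ("K", "91"), ("L", "92"), ("M", "93"), ("N", "94"), ("O", "95"),
  ("P", "96"), ("Q", "97"), ("R", "98"), ("S", "99"), ("T", "90"),
  ("U", "81"), ("V", "82"), ("W", "83"), ("X", "84"), ("Y", "85"),
  ("Z", "86"), ("0", "87"), ("1", "88"), ("2", "89"), ("3", "80"),
  ("4", "41"), ("5", "42"), ("6", "43"), ("7", "44"), ("8", "45"),
  ("9", "46")]

-- A's recursion on the character list of the string (palavra[0] / palavra[1:] = head / tail)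
def cifraA : List Char → String
  | [] => ""                                                            -- len == 0
  | [c] => tabela.getD (PySem.Str.upper (String.ofList [c])) "!"        -- len == 1
  | c :: rest =>                                                        -- general case
      tabela.getD (PySem.Str.upper (String.ofList [c])) "!" ++ cifraA rest

def cifra_data_recursiva (palavra : String) : String := cifraA palavra.toList

-- ===== PORT B =====
-- Source B: _ALFA, _code(c) = closed-form arithmetic code, "".join(_code(c) for c in palavra)
def pvAlfa : String := "ABCDEFGHIJKLMNOPQRSTUVWXYZ0123456789"

def pvCode (c : Char) : String :=
  let i : Int := PySem.Str.find pvAlfa (PySem.Str.upper (String.ofList [c]))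
  if i < 0 then "!"
  else String.ofList [(PySem.Str.pyGet? "1984" (PySem.Int.floordiv i 10)).getD '!']   -- in range: 0 ≤ i < 36
       ++ PySem.Int.toStr (PySem.Int.mod (PySem.Int.mod i 10 + 1) 10)

def cifra_data_recursiva_alt (palavra : String) : String :=
  PySem.Str.join "" (palavra.toList.map pvCode)

-- ===== PRECONDITION & SPEC =====
def Spec_cifra_data_recursiva (palavra : String) (out : String) : Prop := out = cifra_data_recursiva_alt palavra
instance (palavra : String) (out : String) : Decidable (Spec_cifra_data_recursiva palavra out) := by unfold Spec_cifra_data_recursiva; infer_instance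

-- ===== CLAIM (what is proved, stated in full; the proofs are below) =====
def Claim_equal_cifra_data_recursiva : Prop := ∀ (palavra : String), Dom_cifra_data_recursiva palavra → Spec_cifra_data_recursiva palavra (cifra_data_recursiva palavra)

-- ===== LEMMAS AND PROOFS =====

theorem join_empty_cons (s : String) (rest : List String) :
    PySem.Str.join "" (s :: rest) = s ++ PySem.Str.join "" rest := by
  cases rest with
  | nil => simp [PySem.Str.join, PySem.Chars.join, List.intercalate]
  | cons t r => simp [PySem.Str.join, PySem.Chars.join, List.intercalate]

-- per-character agreement of the two encodings, checked over all domain codepoints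
theorem code_agree_all :
    (List.range 127).all
      (fun n => tabela.getD (PySem.Str.upper (String.ofList [Char.ofNat n])) "!" == pvCode (Char.ofNat n)) = true := by
  decide

theorem code_agree (c : Char) (h : pvDomChar c = true) :
    tabela.getD (PySem.Str.upper (String.ofList [c])) "!" = pvCode c := by
  have hlt : c.toNat < 127 := by
    simp [pvDomChar] at h
    omega
  have := List.all_eq_true.mp code_agree_all c.toNat (List.mem_range.mpr hlt)
  rwa [Char.ofNat_toNat, beq_iff_eq] at this

theorem cifra_eq (l : List Char) (h : l.all pvDomChar = true) :
    cifraA l = PySem.Str.join "" (l.map pvCode) := by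
  induction l with
  | nil => simp [cifraA, PySem.Str.join]
  | cons c rest ih =>
    simp only [List.all_cons, Bool.and_eq_true] at h
    have hc := code_agree c h.1
    have hr := ih h.2
    cases rest with
    | nil => simp [cifraA, hc, PySem.Str.join, PySem.Chars.join, List.intercalate]
    | cons d tl =>
      simp only [cifraA, hc, hr, List.map]
      rw [join_empty_cons, join_empty_cons, join_empty_cons]

-- ===== VERDICT (by name: the statement is the Claim_ definition above) =====
theorem cifra_data_recursiva_spec : Claim_equal_cifra_data_recursiva := by
  intro palavra hdom
  unfold Spec_cifra_data_recursiva cifra_data_recursiva cifra_data_recursiva_alt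
  exact cifra_eq palavra.toList hdom
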